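-- pv_equiv track=rewrite | github.com/hpmeffert/Appointment_Agent | apps/lekab_adapter/v1_3_8/lekab_adapter/service.py | _resolve_customer_phone
-- ===== SOURCE A (Python) =====
-- from typing import Any
--
-- def _resolve_customer_phone(summary: dict[str, Any]) -> str | None:
--     for key in ("from", "to"):
--         candidate = str(summary.get(key) or "").strip()
--         if candidate and candidate != "None" and any(character.isdigit() for character in candidate):
--             return candidate
--     for key in ("from", "to"):
--         candidate = str(summary.get(key) or "").strip()
--         if candidate and candidate != "None":
--             return candidate
--     return None
-- ===== SOURCE B (Python) =====
-- def _resolve_customer_phone(summary):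
--     fallback = None
--     for key in ("from", "to"):
--         candidate = str(summary.get(key) or "").strip()
--         if not candidate or candidate == "None":
--             continue
--         if any(character.isdigit() for character in candidate):
--             return candidate
--         if fallback is None:
--             fallback = candidate
--     return fallback
-- ===== Notes on version B (the rewrite author's own statement) =====
-- stated objective: simpler
-- what changed: Single pass over the keys keeping the first digit-free candidate as a fallback, instead of A's two full passes (digit pass then plain pass).
import Mathlib
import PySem

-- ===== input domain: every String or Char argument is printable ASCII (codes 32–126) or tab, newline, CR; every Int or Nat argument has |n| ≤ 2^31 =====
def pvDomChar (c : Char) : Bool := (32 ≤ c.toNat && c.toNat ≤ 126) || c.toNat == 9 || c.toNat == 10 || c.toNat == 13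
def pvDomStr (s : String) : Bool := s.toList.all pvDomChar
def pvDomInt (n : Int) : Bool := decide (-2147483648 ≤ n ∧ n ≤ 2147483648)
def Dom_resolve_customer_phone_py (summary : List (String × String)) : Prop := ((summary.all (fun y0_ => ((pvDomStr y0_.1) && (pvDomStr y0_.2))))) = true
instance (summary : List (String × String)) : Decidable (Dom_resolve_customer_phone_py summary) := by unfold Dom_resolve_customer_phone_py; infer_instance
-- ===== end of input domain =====

-- B: single pass over the keys with a first-non-empty fallback, instead of A's two passes (simpler).

-- ===== PORT A =====
-- candidate = str(summary.get(key) or "").strip()  (values are strings; get→"" on missing, "" stays "")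
def pvCand (summary : List (String × String)) (key : String) : String :=
  PySem.Str.strip (PySem.Dict.getD (PySem.Dict.ofList summary) key "")

-- candidate and candidate != "None"
def pvValid (c : String) : Bool := !(c == "") && !(c == "None")

-- any(character.isdigit() for character in candidate)
def pvHasDigit (c : String) : Bool := c.toList.any PySem.Chars.isdigit

-- first loop: return the first valid candidate containing a digit
-- second loop: return the first valid candidate; else None
def resolve_customer_phone_py (summary : List (String × String)) : Option String :=
  match (["from", "to"].findSome? fun key =>
      let candidate := pvCand summary key
      if pvValid candidate && pvHasDigit candidate then some candidate else none) with
  | some c => some c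
  | none =>
    match (["from", "to"].findSome? fun key =>
        let candidate := pvCand summary key
        if pvValid candidate then some candidate else none) with
    | some c => some c
    | none => none

-- ===== PORT B =====
-- the loop of Source B: fallback accumulator, early return on a digit-bearing candidate
def pvAltLoop (summary : List (String × String)) (keys : List String)
    (fallback : Option String) : Option String :=
  match keys with
  | [] => fallback
  | key :: rest =>
    let candidate := pvCand summary key
    if !(pvValid candidate) then pvAltLoop summary rest fallback
    else if pvHasDigit candidate then some candidate
    else pvAltLoop summary rest (if fallback = none then some candidate else fallback)

def resolve_customer_phone_py_alt (summary : List (String × String)) : Option String :=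
  pvAltLoop summary ["from", "to"] none
-- ===== PRECONDITION & SPEC =====
def Spec_resolve_customer_phone_py (summary : List (String × String)) (out : Option String) : Prop := out = resolve_customer_phone_py_alt summary
instance (summary : List (String × String)) (out : Option String) : Decidable (Spec_resolve_customer_phone_py summary out) := by unfold Spec_resolve_customer_phone_py; infer_instance

-- ===== CLAIM (what is proved, stated in full; the proofs are below) =====
def Claim_equal_resolve_customer_phone_py : Prop := ∀ (summary : List (String × String)), Dom_resolve_customer_phone_py summary → Spec_resolve_customer_phone_py summary (resolve_customer_phone_py summary)

-- ===== LEMMAS AND PROOFS =====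

-- ===== VERDICT (by name: the statement is the Claim_ definition above) =====
theorem resolve_customer_phone_py_spec : Claim_equal_resolve_customer_phone_py := by
  intro summary _
  unfold Spec_resolve_customer_phone_py resolve_customer_phone_py resolve_customer_phone_py_alt
  cases h1 : pvValid (pvCand summary "from") <;>
    cases h2 : pvValid (pvCand summary "to") <;>
    cases h3 : pvHasDigit (pvCand summary "from") <;>
    cases h4 : pvHasDigit (pvCand summary "to") <;>
    simp [pvAltLoop, List.findSome?, h1, h2, h3, h4]
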